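-- pv_equiv track=rewrite | github.com/johurul2024/CascadEye | src/cascadeye/mvp_core.py | _variant_from_keys
-- ===== SOURCE A (Python) =====
-- def _variant_from_keys(sd_keys: list[str]) -> str:
--     keys=set(sd_keys)
--     if any(k.startswith("enc.") for k in keys) or "enc.weight" in keys:
--         return "encdec"
--     if any(k.startswith("attention.") for k in keys) or any(k.startswith("output_layer.") for k in keys):
--         return "noenc"
--     if any(k.startswith("lstm.") for k in keys):
--         return "noenc"
--     raise ValueError("Unrecognized checkpoint format.")
-- ===== SOURCE B (Python) =====
-- _RANK_TABLE = (("enc.", 0), ("attention.", 1), ("output_layer.", 1), ("lstm.", 1))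
--
-- def _rank(k: str) -> int:
--     if k == "enc.weight":
--         return 0
--     for prefix, r in _RANK_TABLE:
--         if k.startswith(prefix):
--             return r
--     return 2
--
-- def _variant_from_keys(sd_keys: list[str]) -> str:
--     best = min(map(_rank, sd_keys), default=2)
--     if best == 2:
--         raise ValueError("Unrecognized checkpoint format.")
--     return "encdec" if best == 0 else "noenc"
-- ===== Notes on version B (the rewrite author's own statement) =====
-- stated objective: alternative
-- what changed: B classifies each key independently into a numeric priority (0 = encoder-decoder evidence, 1 = decoder-only evidence, 2 = unrecognized) via a data-driven prefix table and reduces with min; the answer is read off the minimal priority, replacing A's staged any()-scans over a set with hard-coded precedence.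
import Mathlib
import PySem

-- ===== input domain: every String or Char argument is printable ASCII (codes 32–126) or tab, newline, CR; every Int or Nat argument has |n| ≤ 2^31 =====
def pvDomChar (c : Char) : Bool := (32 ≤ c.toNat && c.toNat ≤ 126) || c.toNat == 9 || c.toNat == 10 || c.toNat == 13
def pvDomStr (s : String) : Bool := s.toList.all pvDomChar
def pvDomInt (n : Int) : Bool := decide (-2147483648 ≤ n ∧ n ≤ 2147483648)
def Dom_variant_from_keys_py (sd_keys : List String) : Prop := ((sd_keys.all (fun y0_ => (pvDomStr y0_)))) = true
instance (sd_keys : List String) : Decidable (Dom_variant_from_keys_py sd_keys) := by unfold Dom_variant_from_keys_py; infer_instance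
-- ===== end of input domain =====

-- B replaces A's staged any()-scans by a per-key priority classification (prefix table) reduced with min (alternative decomposition, same cost).

-- ===== PORT A =====
-- literal port of A; in the branch where Python raises ValueError the port returns "" (excluded by Pre_)
def variant_from_keys_py (sd_keys : List String) : String :=
  let keys : PySem.Set String := PySem.Set.ofList sd_keys
  if keys.any (fun k => PySem.Str.startswith k "enc.") || PySem.Set.contains keys "enc.weight" then "encdec"
  else if keys.any (fun k => PySem.Str.startswith k "attention.") || keys.any (fun k => PySem.Str.startswith k "output_layer.") then "noenc"
  else if keys.any (fun k => PySem.Str.startswith k "lstm.") then "noenc"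
  else ""

-- ===== PORT B =====
-- the prefix → priority table of Source B
def pvRankTable : List (String × Nat) := [("enc.", 0), ("attention.", 1), ("output_layer.", 1), ("lstm.", 1)]

-- the 'for prefix, r in _RANK_TABLE' loop of Source B's _rank: first matching prefix wins, else 2
def pvRankLoop : List (String × Nat) → String → Nat
  | [], _ => 2
  | (p, r) :: t, k => if PySem.Str.startswith k p then r else pvRankLoop t k

-- Source B's _rank
def pvRank (k : String) : Nat :=
  if k == "enc.weight" then 0 else pvRankLoop pvRankTable k

-- literal port of B; min(map(_rank, sd_keys), default=2) = fold of min starting at 2 (exact: every rank ≤ 2);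
-- in the branch where Python raises ValueError the port returns "" (excluded by Pre_)
def variant_from_keys_py_alt (sd_keys : List String) : String :=
  let best := (sd_keys.map pvRank).foldl min 2
  if best == 2 then ""
  else if best == 0 then "encdec" else "noenc"

-- ===== PRECONDITION & SPEC =====
-- Pre_ excludes exactly the inputs on which Python A raises ValueError: no key matches any recognised prefix (or equals "enc.weight")
def Pre_variant_from_keys_py (sd_keys : List String) : Prop :=
  sd_keys.any (fun k => PySem.Str.startswith k "enc." || k == "enc.weight" ||
    PySem.Str.startswith k "attention." || PySem.Str.startswith k "output_layer." ||
    PySem.Str.startswith k "lstm.") = true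
instance (sd_keys : List String) : Decidable (Pre_variant_from_keys_py sd_keys) := by unfold Pre_variant_from_keys_py; infer_instance
def pvWitness_variant_from_keys_py : List String := ["lstm.weight_ih", "enc.weight"]

def Spec_variant_from_keys_py (sd_keys : List String) (out : String) : Prop := out = variant_from_keys_py_alt sd_keys
instance (sd_keys : List String) (out : String) : Decidable (Spec_variant_from_keys_py sd_keys out) := by unfold Spec_variant_from_keys_py; infer_instance

-- ===== CLAIM (what is proved, stated in full; the proofs are below) =====
def Claim_equal_variant_from_keys_py : Prop := ∀ (sd_keys : List String), Dom_variant_from_keys_py sd_keys → Pre_variant_from_keys_py sd_keys → Spec_variant_from_keys_py sd_keys (variant_from_keys_py sd_keys)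

-- ===== LEMMAS AND PROOFS =====

-- "encdec evidence" predicate (A's first branch, per key)
def pvQ1 (k : String) : Bool := PySem.Str.startswith k "enc." || k == "enc.weight"
-- "noenc evidence" predicate (A's later branches, per key)
def pvQ2 (k : String) : Bool :=
  PySem.Str.startswith k "attention." || PySem.Str.startswith k "output_layer." || PySem.Str.startswith k "lstm."

theorem pvRank_eq (k : String) :
    pvRank k = (if pvQ1 k then 0 else if pvQ2 k then 1 else 2) := by
  unfold pvRank pvRankTable pvQ1 pvQ2
  cases h0 : (k == "enc.weight") <;>
    cases h1 : PySem.Str.startswith k "enc." <;>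
    cases h2 : PySem.Str.startswith k "attention." <;>
    cases h3 : PySem.Str.startswith k "output_layer." <;>
    cases h4 : PySem.Str.startswith k "lstm." <;>
    simp only [pvRankLoop, h0, h1, h2, h3, h4, if_true, if_false, ite_true, ite_false,
      Bool.false_eq_true, Bool.true_eq_false, Bool.true_or, Bool.false_or, Bool.or_true, Bool.or_false]

theorem foldl_min_rank (xs : List String) (a : Nat) (ha : a ≤ 2) :
    (xs.map pvRank).foldl min a =
      min a (if xs.any pvQ1 then 0 else if xs.any pvQ2 then 1 else 2) := by
  induction xs generalizing a with
  | nil => simp; omega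
  | cons k t ih =>
    have hk := pvRank_eq k
    simp only [List.map_cons, List.foldl_cons, List.any_cons]
    rw [ih (min a (pvRank k)) (by omega)]
    rcases Bool.eq_false_or_eq_true (pvQ1 k) with hq1 | hq1 <;>
      rcases Bool.eq_false_or_eq_true (pvQ2 k) with hq2 | hq2 <;>
      rcases Bool.eq_false_or_eq_true (t.any pvQ1) with hb1 | hb1 <;>
      rcases Bool.eq_false_or_eq_true (t.any pvQ2) with hb2 | hb2 <;>
      simp only [hq1, hq2, hb1, hb2, Bool.true_or, Bool.false_or, Bool.or_true, Bool.or_false,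
        if_true, if_false, Bool.false_eq_true] at hk ⊢ <;>
      omega

theorem set_any (xs : List String) (p : String → Bool) :
    (PySem.Set.ofList xs).any p = xs.any p := by
  rw [Bool.eq_iff_iff]
  simp only [List.any_eq_true]
  constructor
  · rintro ⟨k, hk, hp⟩; exact ⟨k, (PySem.Set.mem_ofList _ _).mp hk, hp⟩
  · rintro ⟨k, hk, hp⟩; exact ⟨k, (PySem.Set.mem_ofList _ _).mpr hk, hp⟩

theorem contains_ofList_eq_any (xs : List String) (w : String) :
    PySem.Set.contains (PySem.Set.ofList xs) w = xs.any (fun k => k == w) := by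
  rw [Bool.eq_iff_iff, PySem.Set.contains_iff]
  simp only [List.any_eq_true, PySem.Set.mem_ofList, beq_iff_eq]
  constructor
  · intro h; exact ⟨w, h, rfl⟩
  · rintro ⟨k, hk, rfl⟩; exact hk

theorem any_or (xs : List String) (p q : String → Bool) :
    xs.any (fun k => p k || q k) = (xs.any p || xs.any q) := by
  induction xs with
  | nil => simp
  | cons k t ih =>
    simp only [List.any_cons, ih]
    cases p k <;> cases q k <;> simp [Bool.or_left_comm]

theorem variant_from_keys_py_eq (sd_keys : List String) :
    variant_from_keys_py sd_keys = variant_from_keys_py_alt sd_keys := by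
  unfold variant_from_keys_py variant_from_keys_py_alt
  rw [foldl_min_rank sd_keys 2 (by omega)]
  simp only [set_any, contains_ofList_eq_any]
  have h1 : (sd_keys.any (fun k => PySem.Str.startswith k "enc.") ||
      sd_keys.any (fun k => k == "enc.weight")) = sd_keys.any pvQ1 := by
    rw [← any_or]; rfl
  have h2 : (sd_keys.any (fun k => PySem.Str.startswith k "attention.") ||
      sd_keys.any (fun k => PySem.Str.startswith k "output_layer.") ||
      sd_keys.any (fun k => PySem.Str.startswith k "lstm.")) = sd_keys.any pvQ2 := by
    rw [← any_or, ← any_or]; rfl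
  rw [h1]
  cases he : sd_keys.any pvQ1 with
  | true => rfl
  | false =>
    rw [← h2]
    cases ha : sd_keys.any (fun k => PySem.Str.startswith k "attention.") <;>
      cases hb : sd_keys.any (fun k => PySem.Str.startswith k "output_layer.") <;>
      cases hc : sd_keys.any (fun k => PySem.Str.startswith k "lstm.") <;>
      simp

-- ===== VERDICT (by name: the statement is the Claim_ definition above) =====
theorem variant_from_keys_py_spec : Claim_equal_variant_from_keys_py := by
  intro sd_keys _ _
  exact variant_from_keys_py_eq sd_keys
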